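-- pv_equiv track=rewrite | github.com/Kirill-Ye787/Project-Hillel-25.03.2025 | Lesson-5/Home Work-5.3.py | make_hashtag
-- ===== SOURCE A (Python) =====
-- import string
--
-- def make_hashtag(text):
--     # Видаляємо пунктуацію і пробіли
--     clean_text = ''.join(c for c in text if c not in string.punctuation)
--
--     # Розбиваємо на слова та робимо кожне слово з великої літери
--     words = clean_text.split()
--     capitalized_words = [word.capitalize() for word in words]
--
--     # Формуємо хештег
--     hashtag = '#' + ''.join(capitalized_words)
--
--     # Обрізаємо до 140 символів, якщо потрібно
--     if len(hashtag) > 140: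
--         hashtag = hashtag[:140]
--
--     return hashtag
-- ===== SOURCE B (Python) =====
-- import string
--
--
-- def _cap(buf):
--     return ''.join(buf).capitalize()
--
--
-- def make_hashtag(text):
--     words = []
--     buf = []
--     for c in text:
--         if c in string.punctuation:
--             continue
--         if c.isspace():
--             if buf:
--                 words.append(_cap(buf))
--             buf = []
--         else:
--             buf.append(c)
--     if buf:
--         words.append(_cap(buf))
--     return ('#' + ''.join(words))[:140]
-- ===== Notes on version B (the rewrite author's own statement) =====
-- stated objective: alternative
-- what changed: Replaces A's three separate passes (punctuation filter, split, per-word capitalize+join) by one pass over the characters maintaining a current-word buffer that is flushed on whitespace.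
import Mathlib
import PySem

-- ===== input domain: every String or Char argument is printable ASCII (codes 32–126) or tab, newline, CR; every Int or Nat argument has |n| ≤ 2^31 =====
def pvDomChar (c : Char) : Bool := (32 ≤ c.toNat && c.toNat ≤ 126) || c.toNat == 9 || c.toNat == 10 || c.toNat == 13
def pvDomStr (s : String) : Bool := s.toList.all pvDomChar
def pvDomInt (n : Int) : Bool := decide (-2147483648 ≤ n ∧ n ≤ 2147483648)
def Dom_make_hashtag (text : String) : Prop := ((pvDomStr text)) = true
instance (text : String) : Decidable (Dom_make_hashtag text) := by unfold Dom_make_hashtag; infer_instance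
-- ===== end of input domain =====

-- B collapses A's three passes (filter punctuation, split, capitalize+join) into one
-- char loop with a current-word buffer; same return value (objective: alternative).

-- ===== PORT A =====
-- string.punctuation
def pvPunct : List Char := "!\"#$%&'()*+,-./:;<=>?@[\\]^_`{|}~".toList

-- word.capitalize(): hand port, exact on the ASCII domain (upper the first code
-- point, lower the rest)
def pvCap (w : List Char) : List Char :=
  match w with
  | [] => []
  | c :: r => PySem.Chars.upperChar c :: PySem.Chars.lower r

def make_hashtag (text : String) : String :=
  let clean_text := text.toList.filter (fun c => !(pvPunct.contains c))
  let words := PySem.Chars.split₀ clean_text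
  let capitalized_words := words.map pvCap
  let hashtag := '#' :: PySem.Chars.join [] capitalized_words
  if hashtag.length > 140 then
    String.ofList (PySem.List.slice hashtag none (some (140 : Int)))
  else
    String.ofList hashtag

-- ===== PORT B =====
-- the loop body of Source B: skip punctuation, flush the buffer on whitespace,
-- otherwise extend the buffer
def pvStep (st : List (List Char) × List Char) (c : Char) : List (List Char) × List Char :=
  if pvPunct.contains c then st
  else if PySem.Chars.isspace c then
    (if st.2.isEmpty then st.1 else st.1 ++ [pvCap st.2], [])
  else (st.1, st.2 ++ [c])

-- the final 'if buf: words.append(_cap(buf))'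
def pvFlush (st : List (List Char) × List Char) : List (List Char) :=
  if st.2.isEmpty then st.1 else st.1 ++ [pvCap st.2]

def make_hashtag_alt (text : String) : String :=
  let st := text.toList.foldl pvStep ([], [])
  let words := pvFlush st
  String.ofList (('#' :: PySem.Chars.join [] words).take 140)

-- ===== PRECONDITION & SPEC =====
def Spec_make_hashtag (text : String) (out : String) : Prop := out = make_hashtag_alt text
instance (text : String) (out : String) : Decidable (Spec_make_hashtag text out) := by unfold Spec_make_hashtag; infer_instance

-- ===== CLAIM (what is proved, stated in full; the proofs are below) =====
def Claim_equal_make_hashtag : Prop := ∀ (text : String), Dom_make_hashtag text → Spec_make_hashtag text (make_hashtag text)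

-- ===== LEMMAS AND PROOFS =====

lemma pv_go_acc (cs : List Char) : ∀ (cur : List Char) (acc : List (List Char)),
    PySem.Chars.split₀.go cs cur acc = acc.reverse ++ PySem.Chars.split₀.go cs cur [] := by
  induction cs with
  | nil =>
    intro cur acc
    rw [PySem.Chars.split₀.go, PySem.Chars.split₀.go]
    split_ifs <;> simp
  | cons c rest ih =>
    intro cur acc
    rw [PySem.Chars.split₀.go]
    conv_rhs => rw [PySem.Chars.split₀.go]
    split_ifs with hs hc
    · exact ih [] acc
    · rw [ih [] (cur.reverse :: acc), ih [] [cur.reverse]]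
      simp
    · exact ih (c :: cur) acc

-- key invariant: flushing the fold state is A's capitalized word list
lemma pv_key (cs : List Char) : ∀ (buf : List Char) (acc : List (List Char)),
    pvFlush (cs.foldl pvStep (acc, buf))
      = acc ++ (PySem.Chars.split₀.go (cs.filter (fun c => !(pvPunct.contains c))) buf.reverse []).map pvCap := by
  induction cs with
  | nil =>
    intro buf acc
    rw [List.foldl_nil, List.filter_nil, PySem.Chars.split₀.go, pvFlush]
    cases buf <;> simp
  | cons c rest ih =>
    intro buf acc
    rw [List.foldl_cons, List.filter_cons, pvStep]
    by_cases hp : pvPunct.contains c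
    · have hm : c ∈ pvPunct := by simpa using hp
      have hp' : ¬ ((!pvPunct.contains c) = true) := by simp [hm]
      rw [if_pos hp, if_neg hp']
      exact ih buf acc
    · have hm : c ∉ pvPunct := by simpa using hp
      have hp' : (!pvPunct.contains c) = true := by simp [hm]
      rw [if_neg hp, if_pos hp']
      by_cases hs : PySem.Chars.isspace c
      · rw [if_pos hs, PySem.Chars.split₀.go, if_pos hs]
        dsimp only
        by_cases hb : buf.isEmpty
        · have hb' : buf = [] := by simpa [List.isEmpty_iff] using hb
          subst hb'
          simp only [List.reverse_nil, List.isEmpty_nil, ite_true]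
          exact ih [] acc
        · have hbr : ¬ (buf.reverse.isEmpty = true) := by simpa using hb
          rw [if_neg hb, if_neg hbr, pv_go_acc, List.reverse_reverse]
          rw [ih [] (acc ++ [pvCap buf])]
          simp
      · rw [if_neg hs, PySem.Chars.split₀.go, if_neg hs]
        dsimp only
        have hrev : c :: buf.reverse = (buf ++ [c]).reverse := by simp
        rw [hrev]
        exact ih (buf ++ [c]) acc

lemma pv_trunc (l : List Char) :
    (if l.length > 140 then PySem.List.slice l none (some (140 : Int)) else l) = l.take 140 := by
  rw [PySem.List.slice_to l (by norm_num)]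
  have h140 : Int.toNat 140 = 140 := rfl
  rw [h140]
  split_ifs with h
  · rfl
  · exact (List.take_of_length_le (by omega)).symm

-- ===== VERDICT (by name: the statement is the Claim_ definition above) =====
theorem make_hashtag_spec : Claim_equal_make_hashtag := by
  intro text _
  simp only [Spec_make_hashtag, make_hashtag, make_hashtag_alt, PySem.Chars.split₀]
  have hk := pv_key text.toList [] []
  simp only [List.reverse_nil, List.nil_append] at hk
  rw [← hk, ← apply_ite String.ofList, pv_trunc]
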